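-- pv_equiv track=rewrite | github.com/Skorik99/RoPOFL | src/federated_methods/personalized/attack_utils.py | map_fixed_attack_clients
-- ===== SOURCE A (Python) =====
-- from typing import Dict, Iterable
--
-- def map_fixed_attack_clients(
--     list_byzantines: Iterable[int],
--     num_of_clients: int,
--     attack_type: str,
-- ) -> Dict[int, str]:
--     """Map a fixed set of client ids to the provided attack type, others to no_attack."""
--     byz_set = set(list_byzantines or [])
--     return {
--         idx: (attack_type if idx in byz_set else "no_attack")
--         for idx in range(num_of_clients)
--     }
-- ===== SOURCE B (Python) =====
-- def map_fixed_attack_clients(list_byzantines, num_of_clients, attack_type):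
--     byz = sorted(b for b in set(list_byzantines or []) if 0 <= b < num_of_clients)
--     items = []
--     prev = 0
--     for b in byz:
--         items.extend((i, "no_attack") for i in range(prev, b))
--         items.append((b, attack_type))
--         prev = b + 1
--     items.extend((i, "no_attack") for i in range(prev, num_of_clients))
--     return dict(items)
-- ===== Notes on version B (the rewrite author's own statement) =====
-- stated objective: alternative
-- what changed: B sorts the in-range byzantine ids and builds the mapping as concatenated runs of no_attack entries between consecutive byzantine ids (a sort-then-merge sweep), instead of testing every client id against the byzantine set.
import Mathlib
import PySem

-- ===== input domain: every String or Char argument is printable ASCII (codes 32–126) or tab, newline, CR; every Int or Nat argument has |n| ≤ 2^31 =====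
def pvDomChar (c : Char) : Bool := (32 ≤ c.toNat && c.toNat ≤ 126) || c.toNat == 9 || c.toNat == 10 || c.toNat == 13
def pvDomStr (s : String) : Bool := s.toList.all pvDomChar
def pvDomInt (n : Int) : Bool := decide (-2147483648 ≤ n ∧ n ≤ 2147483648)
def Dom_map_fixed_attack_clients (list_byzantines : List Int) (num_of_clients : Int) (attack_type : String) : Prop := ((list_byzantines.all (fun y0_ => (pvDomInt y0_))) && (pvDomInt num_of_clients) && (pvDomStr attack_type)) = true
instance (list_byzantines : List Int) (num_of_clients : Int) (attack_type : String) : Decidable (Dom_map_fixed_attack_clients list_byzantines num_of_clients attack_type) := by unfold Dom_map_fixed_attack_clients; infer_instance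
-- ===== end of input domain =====

-- B sorts the in-range byzantine ids and emits the result as runs of "no_attack" entries
-- between consecutive byzantine ids, never testing a client against the set; objective: alternative.

-- ===== PORT A =====
-- dict comprehension = insert each (idx, value) in range order into an empty dict
def map_fixed_attack_clients (list_byzantines : List Int) (num_of_clients : Int) (attack_type : String) : List (Int × String) :=
  let byz_set : PySem.Set Int := PySem.Set.ofList list_byzantines
  ((PySem.List.pyRange 0 num_of_clients 1).foldl
    (fun d idx => d.insert idx (if PySem.Set.contains byz_set idx then attack_type else "no_attack"))
    PySem.Dict.empty).items

-- ===== PORT B =====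
def map_fixed_attack_clients_alt (list_byzantines : List Int) (num_of_clients : Int) (attack_type : String) : List (Int × String) :=
  let byz := PySem.List.sorted
    (((PySem.Set.ofList list_byzantines) : List Int).filter
      (fun b => decide (0 ≤ b ∧ b < num_of_clients))) (fun x => x)
  let st := byz.foldl
    (fun (st : Int × List (Int × String)) b =>
      (b + 1,
       st.2 ++ (PySem.List.pyRange st.1 b 1).map (fun i => (i, "no_attack")) ++ [(b, attack_type)]))
    (0, [])
  let items := st.2 ++ (PySem.List.pyRange st.1 num_of_clients 1).map (fun i => (i, "no_attack"))
  (PySem.Dict.ofList items).items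

-- ===== PRECONDITION & SPEC =====
def Spec_map_fixed_attack_clients (list_byzantines : List Int) (num_of_clients : Int) (attack_type : String) (out : List (Int × String)) : Prop := out = map_fixed_attack_clients_alt list_byzantines num_of_clients attack_type
instance (list_byzantines : List Int) (num_of_clients : Int) (attack_type : String) (out : List (Int × String)) : Decidable (Spec_map_fixed_attack_clients list_byzantines num_of_clients attack_type out) := by unfold Spec_map_fixed_attack_clients; infer_instance

-- ===== CLAIM (what is proved, stated in full; the proofs are below) =====
def Claim_equal_map_fixed_attack_clients : Prop := ∀ (list_byzantines : List Int) (num_of_clients : Int) (attack_type : String), Dom_map_fixed_attack_clients list_byzantines num_of_clients attack_type → Spec_map_fixed_attack_clients list_byzantines num_of_clients attack_type (map_fixed_attack_clients list_byzantines num_of_clients attack_type)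

-- ===== LEMMAS AND PROOFS =====

-- the run-emitting fold of B, followed by the final tail of "no_attack" entries,
-- produces exactly the labelled range
theorem build_runs (n : Int) (at_ : String) :
    ∀ (byz : List Int) (prev : Int) (acc : List (Int × String)),
    byz.Pairwise (· < ·) → (∀ b ∈ byz, prev ≤ b ∧ b < n) →
    (let st := byz.foldl
        (fun (st : Int × List (Int × String)) b =>
          (b + 1,
           st.2 ++ (PySem.List.pyRange st.1 b 1).map (fun i => (i, "no_attack")) ++ [(b, at_)]))
        (prev, acc)
     st.2 ++ (PySem.List.pyRange st.1 n 1).map (fun i => (i, "no_attack")))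
    = acc ++ (PySem.List.pyRange prev n 1).map
        (fun i => (i, if i ∈ byz then at_ else "no_attack")) := by
  intro byz
  induction byz with
  | nil =>
    intro prev acc _ _
    simp
  | cons b bs ih =>
    intro prev acc hpw hmem
    have hb : prev ≤ b ∧ b < n := hmem b (by simp)
    have hbs_gt : ∀ x ∈ bs, b < x := by
      intro x hx; exact (List.pairwise_cons.mp hpw).1 x hx
    simp only [List.foldl_cons]
    rw [ih (b + 1) _ (List.pairwise_cons.mp hpw).2
        (fun x hx => ⟨by have := hbs_gt x hx; omega, (hmem x (by simp [hx])).2⟩)]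
    have hsplit : PySem.List.pyRange prev n 1
        = PySem.List.pyRange prev b 1 ++ PySem.List.pyRange b n 1 :=
      PySem.List.pyRange_one_append prev b n hb.1 (le_of_lt hb.2)
    have hcons : PySem.List.pyRange b n 1 = b :: PySem.List.pyRange (b + 1) n 1 :=
      PySem.List.pyRange_one_cons hb.2
    rw [hsplit, hcons]
    simp only [List.map_append, List.map_cons, List.append_assoc]
    have e1 : List.map (fun i => (i, if i ∈ b :: bs then at_ else "no_attack"))
        (PySem.List.pyRange prev b 1) = List.map (fun i => ((i : Int), "no_attack"))
        (PySem.List.pyRange prev b 1) := by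
      apply List.map_congr_left
      intro i hi
      rw [PySem.List.mem_pyRange_one] at hi
      have h1 : i ≠ b := by omega
      have h2 : i ∉ bs := fun h => by have := hbs_gt i h; omega
      simp [h1, h2]
    have e3 : List.map (fun i => (i, if i ∈ b :: bs then at_ else "no_attack"))
        (PySem.List.pyRange (b + 1) n 1) = List.map
        (fun i => ((i : Int), if i ∈ bs then at_ else "no_attack"))
        (PySem.List.pyRange (b + 1) n 1) := by
      apply List.map_congr_left
      intro i hi
      rw [PySem.List.mem_pyRange_one] at hi
      have h1 : i ≠ b := by omega
      simp [h1]
    rw [e1, e3]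
    simp

-- ===== VERDICT (by name: the statement is the Claim_ definition above) =====
theorem map_fixed_attack_clients_spec : Claim_equal_map_fixed_attack_clients := by
  intro lb n at_ _
  show map_fixed_attack_clients lb n at_ = map_fixed_attack_clients_alt lb n at_
  simp only [map_fixed_attack_clients, map_fixed_attack_clients_alt]
  set byz := PySem.List.sorted
    (((PySem.Set.ofList lb) : List Int).filter
      (fun b => decide (0 ≤ b ∧ b < n))) (fun x => x) with hbyz
  have hnodup_byz : byz.Nodup :=
    ((PySem.List.sorted_perm _ _ _).nodup_iff).mpr
      ((PySem.Set.nodup_ofList lb).filter _)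
  have hpw : byz.Pairwise (· < ·) := by
    have hle := PySem.List.sorted_pairwise
      (((PySem.Set.ofList lb) : List Int).filter
        (fun b => decide (0 ≤ b ∧ b < n))) (fun x => x)
    rw [← hbyz] at hle
    exact (hle.and hnodup_byz).imp (fun h => lt_of_le_of_ne h.1 h.2)
  have hmem_byz : ∀ x, x ∈ byz ↔ x ∈ lb ∧ (0 ≤ x ∧ x < n) := by
    intro x
    rw [hbyz, (PySem.List.sorted_perm _ _ _).mem_iff, List.mem_filter]
    simp [PySem.Set.mem_ofList]
  -- A's side: range fold over fresh keys appends
  rw [PySem.Dict.items_foldl_insert_fresh (PySem.List.pyRange 0 n 1) (fun x => x)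
      (fun idx => if PySem.Set.contains (PySem.Set.ofList lb) idx then at_ else "no_attack")
      PySem.Dict.empty (by intro a _; exact PySem.Dict.contains_empty a)
      (by simpa using PySem.List.nodup_pyRange_one 0 n)]
  -- B's side: the runs build the labelled range
  have hruns := build_runs n at_ byz 0 [] hpw
    (fun b hb => ⟨((hmem_byz b).mp hb).2.1, ((hmem_byz b).mp hb).2.2⟩)
  simp only at hruns
  rw [hruns]
  simp only [List.nil_append]
  -- dict(items) on nodup increasing keys keeps the items
  rw [show PySem.Dict.ofList
        ((PySem.List.pyRange 0 n 1).map (fun i => (i, if i ∈ byz then at_ else "no_attack")))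
      = ((PySem.List.pyRange 0 n 1).map (fun i => (i, if i ∈ byz then at_ else "no_attack"))).foldl
          (fun d p => d.insert p.1 p.2) PySem.Dict.empty from rfl]
  have hfresh := PySem.Dict.items_foldl_insert_fresh
      ((PySem.List.pyRange 0 n 1).map (fun i => (i, if i ∈ byz then at_ else "no_attack")))
      Prod.fst Prod.snd PySem.Dict.empty
      (fun a _ => PySem.Dict.contains_empty a.1)
      (by rw [List.map_map]; simpa [Function.comp_def] using PySem.List.nodup_pyRange_one 0 n)
  rw [hfresh]
  simp only [PySem.Dict.empty, List.nil_append, List.map_map]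
  apply List.map_congr_left
  intro i hi
  rw [PySem.List.mem_pyRange_one] at hi
  by_cases hm : i ∈ byz
  · have hc : PySem.Set.contains (PySem.Set.ofList lb) i = true := by
      rw [PySem.Set.contains_iff, PySem.Set.mem_ofList]
      exact ((hmem_byz i).mp hm).1
    show (i, if (PySem.Set.ofList lb).contains i = true then at_ else "no_attack")
        = (i, if i ∈ byz then at_ else "no_attack")
    rw [if_pos hm, if_pos hc]
  · have hc : ¬ PySem.Set.contains (PySem.Set.ofList lb) i = true := by
      rw [PySem.Set.contains_iff, PySem.Set.mem_ofList]
      intro h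
      exact hm ((hmem_byz i).mpr ⟨h, hi.1, hi.2⟩)
    show (i, if (PySem.Set.ofList lb).contains i = true then at_ else "no_attack")
        = (i, if i ∈ byz then at_ else "no_attack")
    rw [if_neg hm, if_neg hc]
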